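-- pv_equiv track=rewrite | github.com/a1112/LG_3D | 服务/AlarmDetection/TaperShape.py | findLRValue
-- ===== SOURCE A (Python) =====
-- def findLRValue(line,offset=0):
--     l_value=0
--     r_value=len(line)-1
--     for i in range(len(line)):
--         if line[i]>0:
--             l_value=i
--             break
--     for i in range(len(line)-1,-1,-1):
--         if line[i]>0:
--             r_value=i
--             break
--     return l_value+offset,r_value+offset
-- ===== SOURCE B (Python) =====
-- def findLRValue(line, offset=0):
--     first = 0
--     last = len(line) - 1
--     seen = False
--     for i, v in enumerate(line):
--         if v > 0:
--             if not seen: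
--                 first = i
--                 seen = True
--             last = i
--     return first + offset, last + offset
-- ===== Notes on version B (the rewrite author's own statement) =====
-- stated objective: simpler
-- what changed: Replaced the two opposite-direction break-scans with one forward pass that tracks both the first and last positive index (with a seen flag), keeping A's defaults 0 and len-1.
import Mathlib
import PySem

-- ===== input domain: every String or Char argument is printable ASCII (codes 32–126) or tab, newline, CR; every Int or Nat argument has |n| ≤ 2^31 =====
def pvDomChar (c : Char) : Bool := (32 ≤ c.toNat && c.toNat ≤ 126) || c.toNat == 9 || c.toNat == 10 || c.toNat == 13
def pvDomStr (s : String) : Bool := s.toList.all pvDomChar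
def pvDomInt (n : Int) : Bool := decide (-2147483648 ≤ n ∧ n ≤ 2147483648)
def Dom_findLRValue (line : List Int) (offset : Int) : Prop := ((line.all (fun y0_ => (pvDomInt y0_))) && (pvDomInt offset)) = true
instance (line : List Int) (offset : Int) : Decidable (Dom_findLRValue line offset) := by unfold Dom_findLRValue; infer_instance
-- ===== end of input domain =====

-- B replaces A's two opposite-direction break-scans by one forward pass tracking both endpoints (objective: simpler).

-- ===== PORT A =====
-- first loop: for i in range(len(line)): if line[i] > 0: l_value = i; break
def aFwd (l : List Int) (i : Nat) (lv : Int) : Int :=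
  if h : i < l.length then
    if l[i] > 0 then (i : Int) else aFwd l (i + 1) lv
  else lv
termination_by l.length - i

-- second loop: for i in range(len(line)-1, -1, -1): if line[i] > 0: r_value = i; break
-- (i counts how many indices remain; the visited index is i-1, always in range, so getD is exact)
def aBwd (l : List Int) (i : Nat) (rv : Int) : Int :=
  match i with
  | 0 => rv
  | j + 1 => if l.getD j 0 > 0 then (j : Int) else aBwd l j rv

def findLRValue (line : List Int) (offset : Int) : Int × Int :=
  (aFwd line 0 0 + offset, aBwd line line.length ((line.length : Int) - 1) + offset)

-- ===== PORT B =====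
-- loop body: if v > 0: (if not seen: first = i; seen = True); last = i
def bStep (st : Int × Int × Bool) (p : Int × Int) : Int × Int × Bool :=
  if p.2 > 0 then
    if st.2.2 then (st.1, p.1, true) else (p.1, p.1, true)
  else st

def findLRValue_alt (line : List Int) (offset : Int) : Int × Int :=
  let st := (PySem.List.enumerate line).foldl bStep (0, (line.length : Int) - 1, false)
  (st.1 + offset, st.2.1 + offset)

-- ===== PRECONDITION & SPEC =====
def Spec_findLRValue (line : List Int) (offset : Int) (out : Int × Int) : Prop := out = findLRValue_alt line offset
instance (line : List Int) (offset : Int) (out : Int × Int) : Decidable (Spec_findLRValue line offset out) := by unfold Spec_findLRValue; infer_instance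

-- ===== CLAIM (what is proved, stated in full; the proofs are below) =====
def Claim_equal_findLRValue : Prop := ∀ (line : List Int) (offset : Int), Dom_findLRValue line offset → Spec_findLRValue line offset (findLRValue line offset)

-- ===== LEMMAS AND PROOFS =====

-- index of the first strictly positive element
def firstIdx : List Int → Option Nat
  | [] => none
  | x :: t => if x > 0 then some 0 else (firstIdx t).map (· + 1)

-- index of the last strictly positive element
def lastIdx : List Int → Option Nat
  | [] => none
  | x :: t =>
    match lastIdx t with
    | some j => some (j + 1)
    | none => if x > 0 then some 0 else none

lemma firstIdx_none_iff (l : List Int) : firstIdx l = none ↔ lastIdx l = none := by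
  induction l with
  | nil => simp [firstIdx, lastIdx]
  | cons x t ih =>
    simp only [firstIdx, lastIdx]
    rcases h : lastIdx t with _ | j
    · rw [← ih] at h
      by_cases hx : x > 0 <;> simp [hx, ih, ih.mp h]
    · have : firstIdx t ≠ none := by
        intro hn; rw [ih] at hn; simp [hn] at h
      rcases hf : firstIdx t with _ | i
      · exact absurd hf this
      · by_cases hx : x > 0 <;> simp [hx]

lemma lastIdx_append_singleton (t : List Int) (x : Int) :
    lastIdx (t ++ [x]) = if x > 0 then some t.length else lastIdx t := by
  induction t with
  | nil => simp [lastIdx]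
  | cons y t ih =>
    simp only [List.cons_append, lastIdx, ih]
    by_cases hx : x > 0
    · simp [hx]
    · simp [hx]

lemma aFwd_eq (l : List Int) (i : Nat) (lv : Int) :
    aFwd l i lv = (firstIdx (l.drop i)).elim lv (fun j => ((i + j : Nat) : Int)) := by
  by_cases h : i < l.length
  · rw [aFwd, dif_pos h]
    have hd : l.drop i = l[i] :: l.drop (i + 1) := List.drop_eq_getElem_cons h
    rw [hd]
    by_cases hx : l[i] > 0
    · simp [firstIdx, hx]
    · rw [if_neg hx, aFwd_eq l (i + 1) lv]
      simp only [firstIdx, if_neg hx]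
      rcases hf : firstIdx (l.drop (i + 1)) with _ | j
      · simp
      · simp only [Option.map_some, Option.elim_some]
        congr 1
        omega
  · rw [aFwd, dif_neg h]
    rw [List.drop_eq_nil_of_le (by omega)]
    simp [firstIdx]
termination_by l.length - i

lemma aBwd_eq (l : List Int) (i : Nat) (hi : i ≤ l.length) (rv : Int) :
    aBwd l i rv = (lastIdx (l.take i)).elim rv (fun j => (j : Int)) := by
  induction i with
  | zero => simp [aBwd, lastIdx]
  | succ j ih =>
    have hj : j < l.length := by omega
    have ht : l.take (j + 1) = l.take j ++ [l[j]] := List.take_succ_eq_append_getElem hj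
    have hg : l.getD j 0 = l[j] := List.getD_eq_getElem l 0 hj
    have hlen : (l.take j).length = j := by simp [Nat.min_eq_left (le_of_lt hj)]
    show (if l.getD j 0 > 0 then (j : Int) else aBwd l j rv) = _
    rw [hg, ht, lastIdx_append_singleton, hlen]
    by_cases hx : l[j] > 0
    · rw [if_pos hx, if_pos hx]; simp
    · rw [if_neg hx, if_neg hx]
      exact ih (by omega)

lemma fold_seen (l : List Int) : ∀ (k f0 l0 : Int),
    (PySem.List.enumerate l k).foldl bStep (f0, l0, true) =
      (f0, (lastIdx l).elim l0 (fun j => k + j), true) := by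
  induction l with
  | nil => intro k f0 l0; simp [PySem.List.enumerate, lastIdx]
  | cons x t ih =>
    intro k f0 l0
    simp only [PySem.List.enumerate, List.foldl_cons]
    by_cases hx : x > 0
    · rw [show bStep (f0, l0, true) (k, x) = (f0, k, true) by simp [bStep, hx]]
      rw [ih]
      simp only [lastIdx]
      rcases h : lastIdx t with _ | j
      · simp [hx]
      · simp only [Option.elim_some]
        congr 2
        push_cast; ring
    · rw [show bStep (f0, l0, true) (k, x) = (f0, l0, true) by simp [bStep, hx]]
      rw [ih]
      simp only [lastIdx]
      rcases h : lastIdx t with _ | j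
      · simp [hx]
      · simp only [Option.elim_some]
        congr 2
        push_cast; ring

lemma fold_main (l : List Int) : ∀ (k f0 l0 : Int),
    (PySem.List.enumerate l k).foldl bStep (f0, l0, false) =
      match firstIdx l, lastIdx l with
      | some i, some j => (k + (i : Int), k + (j : Int), true)
      | _, _ => (f0, l0, false) := by
  induction l with
  | nil => intro k f0 l0; simp [PySem.List.enumerate, firstIdx, lastIdx]
  | cons x t ih =>
    intro k f0 l0
    simp only [PySem.List.enumerate, List.foldl_cons]
    by_cases hx : x > 0
    · rw [show bStep (f0, l0, false) (k, x) = (k, k, true) by simp [bStep, hx]]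
      rw [fold_seen]
      simp only [firstIdx, lastIdx, if_pos hx]
      rcases h : lastIdx t with _ | j
      · simp
      · simp only [Option.elim_some]
        norm_num
        ring
    · rw [show bStep (f0, l0, false) (k, x) = (f0, l0, false) by simp [bStep, hx]]
      rw [ih]
      simp only [firstIdx, lastIdx, if_neg hx]
      rcases hf : firstIdx t with _ | i
      · have hl : lastIdx t = none := (firstIdx_none_iff t).mp hf
        simp [hl]
      · have hl : lastIdx t ≠ none := by
          intro hn
          rw [← firstIdx_none_iff] at hn
          simp [hn] at hf
        rcases hlj : lastIdx t with _ | j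
        · exact absurd hlj hl
        · simp only [Option.map_some]
          norm_num
          constructor <;> ring

-- ===== VERDICT (by name: the statement is the Claim_ definition above) =====
theorem findLRValue_spec : Claim_equal_findLRValue := by
  intro line offset _
  unfold Spec_findLRValue findLRValue findLRValue_alt
  rw [fold_main line 0 0 ((line.length : Int) - 1)]
  rw [aFwd_eq line 0 0, aBwd_eq line line.length (le_refl _) ((line.length : Int) - 1)]
  simp only [List.drop_zero, List.take_length]
  rcases hf : firstIdx line with _ | i
  · have hl : lastIdx line = none := (firstIdx_none_iff line).mp hf
    simp [hl]
  · have hl : lastIdx line ≠ none := by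
      intro hn
      rw [← firstIdx_none_iff] at hn
      simp [hn] at hf
    rcases hlj : lastIdx line with _ | j
    · exact absurd hlj hl
    · simp
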